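-- pv_equiv track=rewrite | github.com/stamakle/SENA | src/graph/nodes/live_rag.py | _summary_is_chatty
-- ===== SOURCE A (Python) =====
-- def _summary_is_chatty(summary: str) -> bool:
--     """Return True when summary looks like conversational filler."""
--
--     lower = summary.lower()
--     phrases = (
--         "i'm trying to",
--         "i am trying to",
--         "could you",
--         "please",
--         "help me",
--         "i found",
--         "in this context",
--         "this could be",
--         "let me",
--         "you may",
--     )
--     return any(phrase in lower for phrase in phrases)
-- ===== SOURCE B (Python) =====
-- def _summary_is_chatty(summary: str) -> bool:
--     """Return True when summary looks like conversational filler.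
--
--     Single left-to-right scan: at each position test all phrases at once
--     via str.startswith with a tuple, instead of ten independent substring scans.
--     """
--     phrases = (
--         "i'm trying to",
--         "i am trying to",
--         "could you",
--         "please",
--         "help me",
--         "i found",
--         "in this context",
--         "this could be",
--         "let me",
--         "you may",
--     )
--     lower = summary.lower()
--     return any(lower.startswith(phrases, i) for i in range(len(lower) + 1))
-- ===== Notes on version B (the rewrite author's own statement) =====
-- stated objective: alternative
-- what changed: Replaced ten independent 'phrase in lower' substring scans with one left-to-right pass over positions that tests all phrases at each position via startswith with a tuple.
import Mathlib
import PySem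

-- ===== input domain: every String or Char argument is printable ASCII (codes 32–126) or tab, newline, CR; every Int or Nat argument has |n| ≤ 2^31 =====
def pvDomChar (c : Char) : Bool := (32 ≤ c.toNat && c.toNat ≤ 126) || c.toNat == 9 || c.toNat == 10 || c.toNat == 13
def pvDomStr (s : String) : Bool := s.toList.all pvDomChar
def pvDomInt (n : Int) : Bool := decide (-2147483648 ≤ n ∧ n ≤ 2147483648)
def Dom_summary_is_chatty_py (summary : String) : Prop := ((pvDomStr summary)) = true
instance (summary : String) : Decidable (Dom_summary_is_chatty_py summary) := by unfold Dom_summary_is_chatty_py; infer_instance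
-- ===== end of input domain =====

-- B replaces ten independent substring scans with one left-to-right pass testing all phrases at each position (alternative structure, same cost).

-- the shared phrase tuple (same literals in both Pythons)
def pvPhrases : List (List Char) :=
  [ "i'm trying to".toList,
    "i am trying to".toList,
    "could you".toList,
    "please".toList,
    "help me".toList,
    "i found".toList,
    "in this context".toList,
    "this could be".toList,
    "let me".toList,
    "you may".toList ]

-- ===== PORT A =====
-- any(phrase in lower for phrase in phrases)
def summary_is_chatty_py (summary : String) : Bool :=
  let lower := PySem.Chars.lower summary.toList
  pvPhrases.any (fun phrase => PySem.Chars.isIn phrase lower)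

-- ===== PORT B =====
-- the loop 'for i in range(len(lower)+1): lower.startswith(phrases, i)' as recursion over suffixes
def pvChattyScan : List Char → Bool
  | [] => pvPhrases.any (fun p => PySem.Chars.startswith [] p)
  | c :: t => pvPhrases.any (fun p => PySem.Chars.startswith (c :: t) p) || pvChattyScan t

def summary_is_chatty_py_alt (summary : String) : Bool :=
  pvChattyScan (PySem.Chars.lower summary.toList)

-- ===== PRECONDITION & SPEC =====
def Spec_summary_is_chatty_py (summary : String) (out : Bool) : Prop := out = summary_is_chatty_py_alt summary
instance (summary : String) (out : Bool) : Decidable (Spec_summary_is_chatty_py summary out) := by unfold Spec_summary_is_chatty_py; infer_instance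

-- ===== CLAIM (what is proved, stated in full; the proofs are below) =====
def Claim_equal_summary_is_chatty_py : Prop := ∀ (summary : String), Dom_summary_is_chatty_py summary → Spec_summary_is_chatty_py summary (summary_is_chatty_py summary)

-- ===== LEMMAS AND PROOFS =====

-- the position-by-position scan decides exactly 'some phrase occurs as a substring'
theorem pvChattyScan_eq (l : List Char) :
    pvChattyScan l = pvPhrases.any (fun p => PySem.Chars.isIn p l) := by
  induction l with
  | nil =>
    rw [Bool.eq_iff_iff]
    simp only [pvChattyScan, List.any_eq_true, PySem.Chars.startswith_iff,
      PySem.Chars.isIn_iff_infix, List.prefix_nil, List.infix_nil]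
  | cons c t ih =>
    rw [pvChattyScan, ih, Bool.eq_iff_iff]
    simp only [Bool.or_eq_true, List.any_eq_true, PySem.Chars.startswith_iff,
      PySem.Chars.isIn_iff_infix, List.infix_cons_iff]
    constructor
    · rintro (⟨p, hp, h⟩ | ⟨p, hp, h⟩)
      · exact ⟨p, hp, Or.inl h⟩
      · exact ⟨p, hp, Or.inr h⟩
    · rintro ⟨p, hp, h | h⟩
      · exact Or.inl ⟨p, hp, h⟩
      · exact Or.inr ⟨p, hp, h⟩

-- ===== VERDICT (by name: the statement is the Claim_ definition above) =====
theorem summary_is_chatty_py_spec : Claim_equal_summary_is_chatty_py := by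
  intro summary _
  unfold Spec_summary_is_chatty_py summary_is_chatty_py summary_is_chatty_py_alt
  rw [pvChattyScan_eq]
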